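-- pv_equiv track=rewrite | github.com/DX13-BTR/Helios | core_py/routes/calendar_routes.py | _origins
-- ===== SOURCE A (Python) =====
-- from typing import List, Dict
--
-- def _origins(urls: List[str]) -> List[str]:
--     out = []
--     for u in urls:
--         if "clickup.com" in u:
--             out.append("clickup")
--         elif "todoist.com" in u:
--             out.append("todoist")
--         elif "reclaim.ai" in u:
--             out.append("reclaim")
--         else:
--             out.append("web")
--     # stable unique with mild preference (clickup>todoist>reclaim>web)
--     pref = {"clickup": 3, "todoist": 2, "reclaim": 1, "web": 0}
--     uniq, seen = [], set()
--     for o in out: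
--         if o not in seen:
--             seen.add(o)
--             uniq.append(o)
--     uniq.sort(key=lambda o: pref.get(o, 0), reverse=True)
--     return uniq
-- ===== SOURCE B (Python) =====
-- from typing import List
--
--
-- def _classify(u: str) -> str:
--     if "clickup.com" in u:
--         return "clickup"
--     if "todoist.com" in u:
--         return "todoist"
--     if "reclaim.ai" in u:
--         return "reclaim"
--     return "web"
--
--
-- def _origins(urls: List[str]) -> List[str]:
--     # Preferences are distinct, so the sorted dedup is just the fixed order
--     # clickup > todoist > reclaim > web restricted to the categories present.
--     present = {_classify(u) for u in urls}
--     return [o for o in ("clickup", "todoist", "reclaim", "web") if o in present]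
-- ===== Notes on version B (the rewrite author's own statement) =====
-- stated objective: simpler
-- what changed: B records only which of the four categories appear in a set and emits them in the fixed preference order clickup>todoist>reclaim>web, eliminating A's intermediate duplicate list, explicit dedup loop and final sort.
import Mathlib
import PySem

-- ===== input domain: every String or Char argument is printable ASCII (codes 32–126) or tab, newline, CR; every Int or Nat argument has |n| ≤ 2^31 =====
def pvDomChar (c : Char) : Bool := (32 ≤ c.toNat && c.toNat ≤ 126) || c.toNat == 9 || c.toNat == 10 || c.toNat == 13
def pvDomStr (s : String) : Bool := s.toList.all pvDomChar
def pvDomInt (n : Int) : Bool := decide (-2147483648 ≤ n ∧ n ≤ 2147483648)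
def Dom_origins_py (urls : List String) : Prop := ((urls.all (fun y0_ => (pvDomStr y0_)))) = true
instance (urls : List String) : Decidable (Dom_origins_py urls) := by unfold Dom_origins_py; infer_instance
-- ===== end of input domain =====

-- B records only which of the four categories appear (a set) and emits them in the fixed
-- preference order clickup>todoist>reclaim>web, dropping A's duplicate list, dedup loop and sort.


-- ===== PORT A =====
def pvPref : PySem.Dict String Int :=
  PySem.Dict.ofList [("clickup", 3), ("todoist", 2), ("reclaim", 1), ("web", 0)]

def origins_py (urls : List String) : List String :=
  let out := urls.foldl (fun acc u =>
    if PySem.Str.isIn "clickup.com" u then acc ++ ["clickup"]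
    else if PySem.Str.isIn "todoist.com" u then acc ++ ["todoist"]
    else if PySem.Str.isIn "reclaim.ai" u then acc ++ ["reclaim"]
    else acc ++ ["web"]) []
  let us := out.foldl
    (fun (p : List String × PySem.Set String) o =>
      if PySem.Set.contains p.2 o then p else (p.1 ++ [o], PySem.Set.add p.2 o))
    ([], PySem.Set.empty)
  PySem.List.sorted us.1 (fun o => pvPref.getD o 0) true

-- ===== PORT B =====
def pvClassify (u : String) : String :=
  if PySem.Str.isIn "clickup.com" u then "clickup"
  else if PySem.Str.isIn "todoist.com" u then "todoist"
  else if PySem.Str.isIn "reclaim.ai" u then "reclaim"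
  else "web"

def origins_py_alt (urls : List String) : List String :=
  let present := urls.foldl (fun s u => PySem.Set.add s (pvClassify u)) PySem.Set.empty
  ["clickup", "todoist", "reclaim", "web"].filter (fun o => PySem.Set.contains present o)

-- ===== PRECONDITION & SPEC =====
def Spec_origins_py (urls : List String) (out : List String) : Prop := out = origins_py_alt urls
instance (urls : List String) (out : List String) : Decidable (Spec_origins_py urls out) := by unfold Spec_origins_py; infer_instance

-- ===== CLAIM (what is proved, stated in full; the proofs are below) =====
def Claim_equal_origins_py : Prop := ∀ (urls : List String), Dom_origins_py urls → Spec_origins_py urls (origins_py urls)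

-- ===== LEMMAS AND PROOFS =====

-- A's first loop builds exactly the per-URL classifications.
theorem origins_out_eq_map (urls : List String) :
    urls.foldl (fun acc u =>
      if PySem.Str.isIn "clickup.com" u then acc ++ ["clickup"]
      else if PySem.Str.isIn "todoist.com" u then acc ++ ["todoist"]
      else if PySem.Str.isIn "reclaim.ai" u then acc ++ ["reclaim"]
      else acc ++ ["web"]) [] = urls.map pvClassify := by
  have hstep : (fun (acc : List String) u =>
      if PySem.Str.isIn "clickup.com" u then acc ++ ["clickup"]
      else if PySem.Str.isIn "todoist.com" u then acc ++ ["todoist"]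
      else if PySem.Str.isIn "reclaim.ai" u then acc ++ ["reclaim"]
      else acc ++ ["web"]) = fun acc u => acc ++ [pvClassify u] := by
    funext acc u
    unfold pvClassify
    split_ifs <;> rfl
  rw [hstep, PySem.List.foldl_append_singleton_eq_map]
  rfl

-- A's dedup loop keeps its list and its seen-set identical.
theorem dedup_fold_eq (l : List String) (s : PySem.Set String) :
    l.foldl (fun (p : List String × PySem.Set String) o =>
      if PySem.Set.contains p.2 o then p else (p.1 ++ [o], PySem.Set.add p.2 o)) (s, s)
      = (l.foldl PySem.Set.add s, l.foldl PySem.Set.add s) := by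
  induction l generalizing s with
  | nil => rfl
  | cons x xs ih =>
    rw [List.foldl_cons, List.foldl_cons]
    have hx : (if PySem.Set.contains ((s, s) : List String × PySem.Set String).2 x
          then ((s, s) : List String × PySem.Set String)
          else (((s, s) : List String × PySem.Set String).1 ++ [x],
                PySem.Set.add ((s, s) : List String × PySem.Set String).2 x))
        = (PySem.Set.add s x, PySem.Set.add s x) := by
      show (if PySem.Set.contains s x then ((s, s) : List String × PySem.Set String)
            else (s ++ [x], PySem.Set.add s x)) = (PySem.Set.add s x, PySem.Set.add s x)
      by_cases h : PySem.Set.contains s x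
      · have ha : PySem.Set.add s x = s := by unfold PySem.Set.add; rw [if_pos h]
        rw [if_pos h, ha]
      · have ha : PySem.Set.add s x = s ++ [x] := by unfold PySem.Set.add; rw [if_neg h]
        rw [if_neg h, ha]
    rw [hx, ih]

theorem pvClassify_mem_fixed (u : String) :
    pvClassify u ∈ (["clickup", "todoist", "reclaim", "web"] : List String) := by
  unfold pvClassify; split_ifs <;> simp

-- The reverse-sorted dedup is the fixed preference order restricted to the present categories.
theorem sorted_eq_filter (l : List String)
    (hl : ∀ x ∈ l, x ∈ (["clickup", "todoist", "reclaim", "web"] : List String)) :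
    PySem.List.sorted (PySem.Set.ofList l) (fun o => pvPref.getD o 0) true
      = (["clickup", "todoist", "reclaim", "web"] : List String).filter
          (fun o => PySem.Set.contains (PySem.Set.ofList l) o) := by
  apply PySem.List.sorted_rev_eq_of_perm_of_pairwise_gt
  · rw [List.perm_ext_iff_of_nodup]
    · intro x
      simp only [List.mem_filter, PySem.Set.contains_iff, PySem.Set.mem_ofList]
      constructor
      · rintro ⟨_, hx⟩; exact hx
      · intro hx; exact ⟨hl x hx, hx⟩
    · exact List.Nodup.filter _ (by decide)
    · exact PySem.Set.nodup_ofList l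
  · exact List.Pairwise.filter _ (by decide)

theorem origins_py_eq (urls : List String) : origins_py urls = origins_py_alt urls := by
  simp only [origins_py, origins_py_alt]
  rw [origins_out_eq_map]
  rw [← PySem.Set.update_map_eq_foldl_add, PySem.Set.update_empty]
  have h0 : (PySem.Set.empty : PySem.Set String) = ([] : List String) := rfl
  rw [h0, dedup_fold_eq, ← PySem.Set.ofList_eq_foldl]
  exact sorted_eq_filter _ (by
    intro x hx
    rcases List.mem_map.mp hx with ⟨u, _, rfl⟩
    exact pvClassify_mem_fixed u)

-- ===== VERDICT (by name: the statement is the Claim_ definition above) =====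
theorem origins_py_spec : Claim_equal_origins_py := by
  intro urls _
  unfold Spec_origins_py
  exact origins_py_eq urls
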